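-- pv_equiv track=rewrite | github.com/weeksjc13/Code | 4140/Project Part 2/mychunker.py | tags_since_startwithvb
-- ===== SOURCE A (Python) =====
-- def tags_since_startwithvb(sentence, i):
--   tags = set()
--   for word, pos in sentence[:i]:
--     if (pos.startswith('VB')):
--       tags = set()
--     else:
--       tags.add(pos)
--   return '+'.join(sorted(tags))
-- ===== SOURCE B (Python) =====
-- def tags_since_startwithvb(sentence, i):
--   tags = set()
--   for word, pos in reversed(sentence[:i]):
--     if pos.startswith('VB'):
--       break
--     tags.add(pos)
--   return '+'.join(sorted(tags))
-- ===== Notes on version B (the rewrite author's own statement) =====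
-- stated objective: simpler
-- what changed: B scans the slice backwards and breaks at the first VB tag, collecting the distinct tags after the last VB directly, instead of A's forward pass that resets the set at every VB.
import Mathlib
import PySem

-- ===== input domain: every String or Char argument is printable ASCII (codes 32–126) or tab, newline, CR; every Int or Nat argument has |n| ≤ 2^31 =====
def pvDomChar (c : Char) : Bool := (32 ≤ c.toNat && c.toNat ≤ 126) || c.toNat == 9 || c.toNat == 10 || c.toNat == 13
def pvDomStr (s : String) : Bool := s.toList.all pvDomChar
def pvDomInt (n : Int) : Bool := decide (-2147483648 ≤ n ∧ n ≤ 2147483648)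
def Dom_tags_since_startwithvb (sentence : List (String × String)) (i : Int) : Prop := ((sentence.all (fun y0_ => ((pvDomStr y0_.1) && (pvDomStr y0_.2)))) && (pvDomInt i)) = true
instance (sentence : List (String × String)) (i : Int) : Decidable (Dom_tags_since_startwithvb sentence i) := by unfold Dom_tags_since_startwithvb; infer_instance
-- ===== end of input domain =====

-- B scans the slice backwards and breaks at the first VB tag instead of A's forward pass
-- that resets the set at every VB (objective: simpler).

-- ===== PORT A =====
def tags_since_startwithvb (sentence : List (String × String)) (i : Int) : String :=
  let tags : PySem.Set String :=
    (PySem.List.slice sentence none (some i)).foldl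
      (fun (tags : PySem.Set String) wp =>
        if PySem.Str.startswith wp.2 "VB" then PySem.Set.empty else PySem.Set.add tags wp.2)
      PySem.Set.empty
  PySem.Str.join "+" (PySem.List.sorted tags (fun x => x) false)

-- ===== PORT B =====
-- the 'for … reversed(…): if …: break' loop as structural recursion
def tsvbAltLoop : List (String × String) → PySem.Set String → PySem.Set String
  | [], tags => tags
  | wp :: rest, tags =>
    if PySem.Str.startswith wp.2 "VB" then tags
    else tsvbAltLoop rest (PySem.Set.add tags wp.2)

def tags_since_startwithvb_alt (sentence : List (String × String)) (i : Int) : String :=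
  let tags : PySem.Set String :=
    tsvbAltLoop (PySem.List.slice sentence none (some i)).reverse PySem.Set.empty
  PySem.Str.join "+" (PySem.List.sorted tags (fun x => x) false)

-- ===== PRECONDITION & SPEC =====
def Spec_tags_since_startwithvb (sentence : List (String × String)) (i : Int) (out : String) : Prop := out = tags_since_startwithvb_alt sentence i
instance (sentence : List (String × String)) (i : Int) (out : String) : Decidable (Spec_tags_since_startwithvb sentence i out) := by unfold Spec_tags_since_startwithvb; infer_instance

-- ===== CLAIM (what is proved, stated in full; the proofs are below) =====
def Claim_equal_tags_since_startwithvb : Prop := ∀ (sentence : List (String × String)) (i : Int), Dom_tags_since_startwithvb sentence i → Spec_tags_since_startwithvb sentence i (tags_since_startwithvb sentence i)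

-- ===== LEMMAS AND PROOFS =====

def tsvbVB (wp : String × String) : Bool := PySem.Str.startswith wp.2 "VB"

-- tags collected by a break-at-first-VB scan of a (reversed) list
def tsvbSuffTags : List (String × String) → List String
  | [] => []
  | wp :: rest => if tsvbVB wp then [] else wp.2 :: tsvbSuffTags rest

def tsvbStep (s : PySem.Set String) (wp : String × String) : PySem.Set String :=
  if tsvbVB wp then PySem.Set.empty else PySem.Set.add s wp.2

theorem tsvbAltLoop_cons (wp : String × String) (rest : List (String × String))
    (t : PySem.Set String) :
    tsvbAltLoop (wp :: rest) t =
      if tsvbVB wp then t else tsvbAltLoop rest (PySem.Set.add t wp.2) := rfl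

theorem tsvbSuffTags_of_noVB (l : List (String × String))
    (h : ∀ wp ∈ l, tsvbVB wp = false) :
    tsvbSuffTags l = l.map Prod.snd := by
  induction l with
  | nil => rfl
  | cons wp rest ih =>
    simp only [tsvbSuffTags, h wp (by simp), if_false, Bool.false_eq_true, List.map_cons]
    rw [ih (fun x hx => h x (by simp [hx]))]

theorem tsvbSuffTags_append (xs ys : List (String × String)) :
    tsvbSuffTags (xs ++ ys) =
      if ∀ wp ∈ xs, tsvbVB wp = false
      then xs.map Prod.snd ++ tsvbSuffTags ys else tsvbSuffTags xs := by
  induction xs with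
  | nil => simp
  | cons wp rest ih =>
    by_cases hv : tsvbVB wp = true
    · simp [tsvbSuffTags, hv]
    · replace hv : tsvbVB wp = false := by simpa using hv
      simp only [List.cons_append, tsvbSuffTags, hv, Bool.false_eq_true, if_false, ih,
        List.forall_mem_cons, List.map_cons]
      split_ifs <;> simp_all

theorem mem_tsvbAltLoop (r : List (String × String)) (t : PySem.Set String) (x : String) :
    x ∈ tsvbAltLoop r t ↔ x ∈ t ∨ x ∈ tsvbSuffTags r := by
  induction r generalizing t with
  | nil => simp [tsvbAltLoop, tsvbSuffTags]
  | cons wp rest ih =>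
    rw [tsvbAltLoop_cons]
    by_cases hv : tsvbVB wp = true
    · simp [tsvbSuffTags, hv]
    · replace hv : tsvbVB wp = false := by simpa using hv
      simp only [tsvbSuffTags, hv, Bool.false_eq_true, if_false, ih,
        PySem.Set.mem_add, List.mem_cons]
      tauto

theorem mem_tsvbFold (l : List (String × String)) (s : PySem.Set String) (x : String) :
    x ∈ l.foldl tsvbStep s ↔
      ((∀ wp ∈ l, tsvbVB wp = false) ∧ x ∈ s) ∨ x ∈ tsvbSuffTags l.reverse := by
  induction l generalizing s with
  | nil => simp [tsvbSuffTags]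
  | cons wp rest ih =>
    simp only [List.foldl_cons, List.reverse_cons, tsvbSuffTags_append, ih,
      List.forall_mem_cons]
    have hrev : (∀ x ∈ rest.reverse, tsvbVB x = false) ↔ ∀ x ∈ rest, tsvbVB x = false := by
      simp
    by_cases hr : ∀ x ∈ rest, tsvbVB x = false
    · rw [if_pos (hrev.mpr hr), tsvbSuffTags_of_noVB rest.reverse (hrev.mpr hr)]
      by_cases hv : tsvbVB wp = true
      · simp only [tsvbStep, hv, if_true, tsvbSuffTags, List.append_nil]
        simp [PySem.Set.empty, List.mem_reverse]
      · replace hv : tsvbVB wp = false := by simpa using hv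
        simp only [tsvbStep, hv, Bool.false_eq_true, if_false, tsvbSuffTags,
          PySem.Set.mem_add, List.mem_append, List.mem_singleton]
        tauto
    · rw [if_neg (fun h => hr (hrev.mp h))]
      tauto

theorem nodup_tsvbFold (l : List (String × String)) (s : PySem.Set String) (h : s.Nodup) :
    (l.foldl tsvbStep s).Nodup := by
  induction l generalizing s with
  | nil => exact h
  | cons wp rest ih =>
    simp only [List.foldl_cons, tsvbStep]
    by_cases hv : tsvbVB wp = true
    · rw [if_pos hv]; exact ih _ List.nodup_nil
    · rw [if_neg hv]; exact ih _ (PySem.Set.nodup_add _ _ h)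

theorem nodup_tsvbAltLoop (r : List (String × String)) (t : PySem.Set String) (h : t.Nodup) :
    (tsvbAltLoop r t).Nodup := by
  induction r generalizing t with
  | nil => exact h
  | cons wp rest ih =>
    rw [tsvbAltLoop_cons]
    by_cases hv : tsvbVB wp = true
    · rw [if_pos hv]; exact h
    · rw [if_neg hv]; exact ih _ (PySem.Set.nodup_add _ _ h)

-- ===== VERDICT (by name: the statement is the Claim_ definition above) =====
theorem tags_since_startwithvb_spec : Claim_equal_tags_since_startwithvb := by
  intro sentence i _
  unfold Spec_tags_since_startwithvb tags_since_startwithvb tags_since_startwithvb_alt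
  set l := PySem.List.slice sentence none (some i) with hl
  have hfold : l.foldl
      (fun (tags : PySem.Set String) wp =>
        if PySem.Str.startswith wp.2 "VB" then PySem.Set.empty else PySem.Set.add tags wp.2)
      PySem.Set.empty = l.foldl tsvbStep PySem.Set.empty := rfl
  simp only [hfold]
  have hemp : (PySem.Set.empty : PySem.Set String).Nodup := List.nodup_nil
  have hperm : (l.foldl tsvbStep PySem.Set.empty).Perm
      (tsvbAltLoop l.reverse PySem.Set.empty) := by
    rw [List.perm_ext_iff_of_nodup (nodup_tsvbFold l _ hemp) (nodup_tsvbAltLoop l.reverse _ hemp)]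
    intro x
    rw [mem_tsvbFold, mem_tsvbAltLoop]
    simp [PySem.Set.empty]
  rw [PySem.List.sorted_eq_sorted_of_perm _ _ _ (fun a b h => h) hperm]
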